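-- pv_equiv track=rewrite | github.com/egor230/work | web_libs.py | clean_dictionary_keys
-- ===== SOURCE A (Python) =====
-- def clean_dictionary_keys(res):  # Список недопустимых символов в именах файлов
--   invalid_chars = ['<', '>', ':', '"', '/', '\\', '|', '?', '*']
--    # Создаем новый словарь
--   cleaned_res = {}
--   # Проходим по всем парам ключ-значение в исходном словаре
--   for title, link in res.items():
--    # Очищаем ключ (название статьи) от недопустимых символов
--    clean_title = title
--    for char in invalid_chars:
--     clean_title = clean_title.replace(char, '')
--    # Добавляем запись с очищенным ключом в новый словарь
--    cleaned_res[clean_title] = link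
--   return cleaned_res
-- ===== SOURCE B (Python) =====
-- def clean_dictionary_keys(res):
--   # Same result as A, but each title is cleaned in one pass over its characters
--   # against a set of the invalid characters, instead of 9 full replace() scans.
--   invalid = {'<', '>', ':', '"', '/', '\\', '|', '?', '*'}
--   cleaned = {}
--   for title, link in res.items():
--     cleaned[''.join(c for c in title if c not in invalid)] = link
--   return cleaned
-- ===== Notes on version B (the rewrite author's own statement) =====
-- stated objective: idiomatic
-- what changed: A rebuilds each title 9 times, once per invalid character, via str.replace; B makes a single pass over the title's characters keeping those not in a set of the 9 invalid characters.
import Mathlib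
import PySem

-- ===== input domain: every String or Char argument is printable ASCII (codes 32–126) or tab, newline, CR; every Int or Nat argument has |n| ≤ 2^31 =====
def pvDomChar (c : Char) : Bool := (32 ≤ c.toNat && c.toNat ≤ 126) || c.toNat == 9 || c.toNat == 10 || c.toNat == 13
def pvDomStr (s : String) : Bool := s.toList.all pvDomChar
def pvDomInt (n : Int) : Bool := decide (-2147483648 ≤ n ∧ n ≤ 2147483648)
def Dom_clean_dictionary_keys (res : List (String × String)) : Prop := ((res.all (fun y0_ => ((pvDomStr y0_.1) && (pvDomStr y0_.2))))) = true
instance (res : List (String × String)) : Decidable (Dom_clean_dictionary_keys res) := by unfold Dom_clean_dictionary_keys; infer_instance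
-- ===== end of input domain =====

-- B cleans each title in ONE pass over its characters against a set of the 9 invalid
-- characters, instead of A's 9 successive str.replace rebuilds (idiomatic objective).


-- ===== PORT A =====
-- invalid_chars = ['<', '>', ':', '"', '/', '\\', '|', '?', '*']
def pvInvalidCharsA : List String := ["<", ">", ":", "\"", "/", "\\", "|", "?", "*"]

def clean_dictionary_keys (res : List (String × String)) : List (String × String) :=
  (res.foldl
    (fun cleaned_res p =>
      -- clean_title = title; for char in invalid_chars: clean_title = clean_title.replace(char, '')
      let clean_title := pvInvalidCharsA.foldl (fun t ch => PySem.Str.replace t ch "") p.1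
      cleaned_res.insert clean_title p.2)
    (PySem.Dict.empty : PySem.Dict String String)).items

-- ===== PORT B =====
-- invalid = {'<', '>', ':', '"', '/', '\\', '|', '?', '*'}
def pvInvalidSet : PySem.Set Char := PySem.Set.ofList ['<', '>', ':', '"', '/', '\\', '|', '?', '*']

def clean_dictionary_keys_alt (res : List (String × String)) : List (String × String) :=
  (res.foldl
    (fun cleaned p =>
      -- ''.join(c for c in title if c not in invalid)
      cleaned.insert (String.ofList (p.1.toList.filter (fun c => !(PySem.Set.contains pvInvalidSet c)))) p.2)
    (PySem.Dict.empty : PySem.Dict String String)).items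

-- ===== PRECONDITION & SPEC =====
def Spec_clean_dictionary_keys (res : List (String × String)) (out : List (String × String)) : Prop := out = clean_dictionary_keys_alt res
instance (res : List (String × String)) (out : List (String × String)) : Decidable (Spec_clean_dictionary_keys res out) := by unfold Spec_clean_dictionary_keys; infer_instance

-- ===== CLAIM (what is proved, stated in full; the proofs are below) =====
def Claim_equal_clean_dictionary_keys : Prop := ∀ (res : List (String × String)), Dom_clean_dictionary_keys res → Spec_clean_dictionary_keys res (clean_dictionary_keys res)

-- ===== LEMMAS AND PROOFS =====

-- replace.go with a single-char pattern and empty replacement filters that char out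
theorem pv_go_single (c : Char) (l acc : List Char) (fuel : Nat) (h : l.length <= fuel) :
    PySem.Chars.replace.go [c] [] fuel l acc = acc.reverse ++ l.filter (fun x => !(x == c)) := by
  induction l generalizing acc fuel with
  | nil =>
    cases fuel <;> simp [PySem.Chars.replace.go]
  | cons c' t ih =>
    cases fuel with
    | zero => simp at h
    | succ n =>
      simp only [PySem.Chars.replace.go]
      by_cases hc : c = c'
      · subst hc
        have hp : List.isPrefixOf [c] (c :: t) = true := by simp [List.isPrefixOf]
        simp only [hp, if_true, List.length_cons, List.length_nil, List.drop_succ_cons,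
          List.drop_zero, List.reverse_nil, List.nil_append]
        rw [ih acc n (by simpa using h)]
        simp
      · have hp : List.isPrefixOf [c] (c' :: t) = false := by
          simp [List.isPrefixOf]; exact fun h' => absurd h' hc
        simp only [hp, Bool.false_eq_true, if_false]
        rw [ih (c' :: acc) n (by simpa using h)]
        simp [Ne.symm hc]

theorem pv_replace_single (c : Char) (s : List Char) :
    PySem.Chars.replace s [c] [] = s.filter (fun x => !(x == c)) := by
  rw [PySem.Chars.replace]
  simp only [List.isEmpty_cons, Bool.false_eq_true, if_false]
  simpa using pv_go_single c s [] s.length le_rfl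

-- folding single-char removals over a char list = one filter against list membership
theorem pv_fold_replace (cl : List Char) (s : String) :
    (cl.map (fun c => String.ofList [c])).foldl (fun t ch => PySem.Str.replace t ch "") s
      = String.ofList (s.toList.filter (fun x => !(cl.contains x))) := by
  induction cl generalizing s with
  | nil => simp [String.ofList_toList]
  | cons c rest ih =>
    simp only [List.map_cons, List.foldl_cons]
    rw [show PySem.Str.replace s (String.ofList [c]) ""
          = String.ofList (s.toList.filter (fun x => !(x == c))) by
        simp [PySem.Str.replace, pv_replace_single]]
    rw [ih]
    congr 1
    rw [String.toList_ofList, List.filter_filter]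
    apply List.filter_congr
    intro x _
    by_cases hx : x = c
    · simp [hx]
    · simp [hx]

-- A's per-title cleaning equals B's per-title cleaning
theorem pv_clean_title_eq (s : String) :
    pvInvalidCharsA.foldl (fun t ch => PySem.Str.replace t ch "") s
      = String.ofList (s.toList.filter (fun c => !(PySem.Set.contains pvInvalidSet c))) := by
  have h := pv_fold_replace ['<', '>', ':', '"', '/', '\\', '|', '?', '*'] s
  have hA : (['<', '>', ':', '"', '/', '\\', '|', '?', '*'].map (fun c => String.ofList [c]))
      = pvInvalidCharsA := by rfl
  have hset : pvInvalidSet = ['<', '>', ':', '"', '/', '\\', '|', '?', '*'] := by decide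
  rw [hA] at h
  rw [h, hset]
  simp only [PySem.Set.contains_eq_listContains]

-- ===== VERDICT (by name: the statement is the Claim_ definition above) =====
theorem clean_dictionary_keys_spec : Claim_equal_clean_dictionary_keys := by
  intro res _
  unfold Spec_clean_dictionary_keys clean_dictionary_keys clean_dictionary_keys_alt
  simp only [pv_clean_title_eq]
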